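-- pv_equiv track=rewrite | github.com/Anuvab-Chakraborty/My_DSA_Journey_PYTHON | CODEFORCES PROBLEMS IN PYTHON/1520A.py | solve
-- ===== SOURCE A (Python) =====
-- def solve(n,s):
--     d={}
--     d[s[0]]=1
--     seen=s[0]
--     for i in range(1,n):
--         current=s[i]
--         if current==seen:
--             d[current]+=1
--             seen=current
--         else:
--             if current in d.keys():
--                 if d[current]>0:
--                     return "NO"
--             else:
--                 d[current]=1
--                 seen=current
--     return "YES"
-- ===== SOURCE B (Python) =====
-- def solve(n, s):
--     prev = s[0]
--     runs = [prev]
--     for i in range(1, n):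
--         c = s[i]
--         if c != prev:
--             runs.append(c)
--             prev = c
--     return "YES" if len(runs) == len(set(runs)) else "NO"
-- ===== Notes on version B (the rewrite author's own statement) =====
-- stated objective: simpler
-- what changed: Replaces A's inline dict-with-counts and early-exit membership test by a first pass that run-length-compresses s[:n] into the list of run heads, followed by one separate duplicate check len(runs)==len(set(runs)) at the end.
-- outside the precondition, e.g. on solve(100, 'aba'): A returns 'NO', B raises IndexError
import Mathlib
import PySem

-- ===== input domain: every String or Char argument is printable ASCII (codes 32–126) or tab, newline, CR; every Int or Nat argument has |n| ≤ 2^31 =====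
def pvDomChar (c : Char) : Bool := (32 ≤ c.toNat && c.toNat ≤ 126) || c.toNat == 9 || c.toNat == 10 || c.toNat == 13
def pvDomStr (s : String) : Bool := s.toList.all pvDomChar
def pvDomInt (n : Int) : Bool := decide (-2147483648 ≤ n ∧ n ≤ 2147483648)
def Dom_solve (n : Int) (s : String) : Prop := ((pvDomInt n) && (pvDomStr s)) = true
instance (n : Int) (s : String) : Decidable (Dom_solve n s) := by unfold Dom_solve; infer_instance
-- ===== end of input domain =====

-- B replaces A's inline dict-of-counts with early exit by a run-length-compression pass followed
-- by one duplicate check on the run heads at the end (simpler decomposition; same O(n) cost).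


-- ===== PORT A =====
-- A's loop over range(1, n); state is (d, seen).  `""` marks s[i] out of range (IndexError, outside
-- Pre_).  `d[current] += 1` is d.modify current 0 (· + 1): faithful because seen (and hence current
-- in that branch) is always a key of d, so the default 0 is never used inside Pre_.
def solveLoopA (cs : List Char) (d : PySem.Dict Char Int) (seen : Char) : List Int → String
  | [] => "YES"
  | i :: rest =>
    match PySem.List.pyGet? cs i with
    | none => ""
    | some current =>
      if current == seen then
        solveLoopA cs (d.modify current 0 (· + 1)) current rest
      else
        if d.contains current then
          if d.getD current 0 > 0 then "NO"
          else solveLoopA cs d seen rest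
        else
          solveLoopA cs (d.insert current 1) current rest

def solve (n : Int) (s : String) : String :=
  match PySem.Str.pyGet? s 0 with
  | none => ""  -- s[0] raises IndexError on empty s (outside Pre_)
  | some c0 =>
    solveLoopA s.toList ((PySem.Dict.empty).insert c0 1) c0 (PySem.List.pyRange 1 n 1)

-- ===== PORT B =====
-- B's first pass: run-length-compress s[:n] into the list of run heads.  none = IndexError.
def buildRuns (cs : List Char) (prev : Char) (runs : List Char) : List Int → Option (List Char)
  | [] => some runs
  | i :: rest =>
    match PySem.List.pyGet? cs i with
    | none => none
    | some c =>
      if c != prev then buildRuns cs c (runs ++ [c]) rest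
      else buildRuns cs prev runs rest

def solve_alt (n : Int) (s : String) : String :=
  match PySem.Str.pyGet? s 0 with
  | none => ""  -- s[0] raises IndexError on empty s (outside Pre_)
  | some c0 =>
    match buildRuns s.toList c0 [c0] (PySem.List.pyRange 1 n 1) with
    | none => ""
    | some runs =>
      if runs.length == (PySem.Set.ofList runs).length then "YES" else "NO"

-- ===== PRECONDITION & SPEC =====
-- Pre_ excludes empty s and n > len(s), where the indexed reads go out of range: there A raises
-- IndexError unless its duplicate check fires first (e.g. (100, "aba") returns "NO"), while B,
-- which only checks duplicates after reading all of s[1:n], always raises IndexError.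
def Pre_solve (n : Int) (s : String) : Prop := s.toList ≠ [] ∧ n ≤ (s.toList.length : Int)
instance (n : Int) (s : String) : Decidable (Pre_solve n s) := by unfold Pre_solve; infer_instance

def pvWitness_solve : Int × String := (3, "aab")

def Spec_solve (n : Int) (s : String) (out : String) : Prop := out = solve_alt n s
instance (n : Int) (s : String) (out : String) : Decidable (Spec_solve n s out) := by unfold Spec_solve; infer_instance

-- ===== CLAIM (what is proved, stated in full; the proofs are below) =====
def Claim_equal_solve : Prop := ∀ (n : Int) (s : String), Dom_solve n s → Pre_solve n s → Spec_solve n s (solve n s)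

-- ===== LEMMAS AND PROOFS =====

-- when every index is in range, buildRuns only ever appends to runs
lemma buildRuns_append (cs : List Char) :
    ∀ (is : List Int) (prev : Char) (runs : List Char),
      (∀ i ∈ is, (PySem.List.pyGet? cs i).isSome) →
      ∃ tail, buildRuns cs prev runs is = some (runs ++ tail) := by
  intro is
  induction is with
  | nil => intro prev runs _; exact ⟨[], by simp [buildRuns]⟩
  | cons i rest ih =>
    intro prev runs h
    have hi := h i (by simp)
    obtain ⟨c, hc⟩ := Option.isSome_iff_exists.mp hi
    have hrest : ∀ j ∈ rest, (PySem.List.pyGet? cs j).isSome := fun j hj => h j (by simp [hj])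
    by_cases hcp : c = prev
    · obtain ⟨tail, ht⟩ := ih prev runs hrest
      exact ⟨tail, by simp [buildRuns, hc, hcp, ht]⟩
    · obtain ⟨tail, ht⟩ := ih c (runs ++ [c]) hrest
      exact ⟨c :: tail, by simp [buildRuns, hc, hcp, ht]⟩

-- len(runs) == len(set(runs)) is exactly Nodup
lemma ofList_length_eq_iff (rs : List Char) :
    (PySem.Set.ofList rs).length = rs.length ↔ rs.Nodup := by
  constructor
  · intro h
    have hperm : (PySem.Set.ofList rs).Perm rs.dedup := by
      rw [List.perm_ext_iff_of_nodup (PySem.Set.nodup_ofList rs) rs.nodup_dedup]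
      intro a; rw [PySem.Set.mem_ofList, List.mem_dedup]
    have hlen : rs.dedup.length = rs.length := hperm.length_eq ▸ h
    have : rs.dedup = rs := rs.dedup_sublist.eq_of_length hlen
    exact List.dedup_eq_self.mp this
  · intro h; rw [PySem.Set.ofList_eq_self_of_nodup rs h]

-- the loop invariant: A's dict keys are exactly B's run heads (in order), all counts positive,
-- and A's `seen` equals B's `prev`
lemma loop_eq (cs : List Char) :
    ∀ (is : List Int) (d : PySem.Dict Char Int) (seen : Char) ,
      (∀ i ∈ is, (PySem.List.pyGet? cs i).isSome) →
      d.keys.Nodup → (∀ k ∈ d.keys, 0 < d.getD k 0) → seen ∈ d.keys →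
      solveLoopA cs d seen is =
        (match buildRuns cs seen d.keys is with
         | none => ""
         | some rs => if rs.length == (PySem.Set.ofList rs).length then "YES" else "NO") := by
  intro is
  induction is with
  | nil =>
    intro d seen _ hnd _ _
    simp [solveLoopA, buildRuns,
      PySem.Set.ofList_eq_self_of_nodup d.keys hnd]
  | cons i rest ih =>
    intro d seen h hnd hpos hseen
    have hi := h i (by simp)
    obtain ⟨c, hc⟩ := Option.isSome_iff_exists.mp hi
    have hrest : ∀ j ∈ rest, (PySem.List.pyGet? cs j).isSome := fun j hj => h j (by simp [hj])
    by_cases hcs : c = seen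
    · -- current == seen: A bumps the count, B skips; keys and run heads unchanged
      subst hcs
      have hcont : d.contains c = true := (PySem.Dict.contains_iff_mem_keys d c).mpr hseen
      have hkeys : (d.modify c 0 (· + 1)).keys = d.keys := by
        rw [PySem.Dict.keys_modify, PySem.Dict.keys_insert_of_contains d _ hcont]
      have hpos' : ∀ k ∈ (d.modify c 0 (· + 1)).keys, 0 < (d.modify c 0 (· + 1)).getD k 0 := by
        intro k hk
        rw [hkeys] at hk
        rw [PySem.Dict.getD_modify]
        split_ifs with hkc
        · subst hkc; have := hpos k hk; omega
        · exact hpos k hk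
      have := ih (d.modify c 0 (· + 1)) c hrest (hkeys ▸ hnd) hpos' (hkeys ▸ hseen)
      simp only [solveLoopA, buildRuns, hc, BEq.rfl, if_true, bne_self_eq_false, Bool.false_eq_true,
        if_false, this, hkeys]
    · by_cases hin : c ∈ d.keys
      · -- duplicate run head: A returns "NO"; B finishes the pass and the final check fails
        have hcont : d.contains c = true := (PySem.Dict.contains_iff_mem_keys d c).mpr hin
        have hgt : d.getD c 0 > 0 := hpos c hin
        obtain ⟨tail, ht⟩ := buildRuns_append cs rest c (d.keys ++ [c]) hrest
        have hnodup : ¬ ((d.keys ++ [c]) ++ tail).Nodup := by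
          intro hn
          have h2 := (List.nodup_append.mp (List.nodup_append.mp hn).1).2.2
          exact h2 c hin c (by simp) rfl
        have hne : ((PySem.Set.ofList ((d.keys ++ [c]) ++ tail)).length
            = ((d.keys ++ [c]) ++ tail).length) → False := fun hEq =>
          hnodup ((ofList_length_eq_iff _).mp hEq)
        simp only [solveLoopA, buildRuns, hc, hcs, beq_iff_eq, if_false, hcont, if_true, hgt,
          bne_iff_ne, ne_eq, not_false_eq_true, if_true, ht]
        rw [if_neg]
        exact fun hb => hne hb.symm
      · -- new run head: A inserts it, B appends it
        have hcont : d.contains c = false := by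
          rw [← Bool.not_eq_true, PySem.Dict.contains_iff_mem_keys]; exact hin
        have hkeys : (d.insert c 1).keys = d.keys ++ [c] :=
          PySem.Dict.keys_insert_of_not_contains d 1 hcont
        have hnd' : (d.insert c 1).keys.Nodup := by
          rw [hkeys]
          refine List.nodup_append.mpr ⟨hnd, List.nodup_singleton c, ?_⟩
          intro a ha b hb
          rw [List.mem_singleton.mp hb]
          exact fun hab => hin (hab ▸ ha)
        have hpos' : ∀ k ∈ (d.insert c 1).keys, 0 < (d.insert c 1).getD k 0 := by
          intro k hk
          rw [PySem.Dict.getD_insert]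
          split_ifs with hkc
          · omega
          · exact hpos k (by rw [hkeys] at hk; simpa [hkc] using hk)
        have hmem : c ∈ (d.insert c 1).keys := by rw [hkeys]; simp
        have := ih (d.insert c 1) c hrest hnd' hpos' hmem
        simp only [solveLoopA, buildRuns, hc, hcs, beq_iff_eq, if_false, hcont,
          Bool.false_eq_true, bne_iff_ne, ne_eq, not_false_eq_true, if_true, this, hkeys]

-- ===== VERDICT (by name: the statement is the Claim_ definition above) =====
theorem solve_spec : Claim_equal_solve := by
  intro n s _ hpre
  obtain ⟨hne, hlen⟩ := hpre
  unfold Spec_solve solve solve_alt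
  obtain ⟨c0, cs, hcs⟩ : ∃ c0 cs, s.toList = c0 :: cs := by
    cases h : s.toList with
    | nil => exact absurd h hne
    | cons a l => exact ⟨a, l, rfl⟩
  have h0 : PySem.Str.pyGet? s 0 = some c0 := by
    rw [PySem.Str.pyGet?_eq, PySem.Chars.pyGet?_eq_listPyGet?, PySem.List.pyGet?_zero, hcs]
    simp
  rw [h0]
  have hrange : ∀ i ∈ PySem.List.pyRange 1 n 1, (PySem.List.pyGet? s.toList i).isSome := by
    intro i hi
    have hb := (PySem.List.mem_pyRange_one).mp hi
    have h1 : (0:Int) ≤ i := by omega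
    have h2 : i < (s.toList.length : Int) := by omega
    rw [PySem.List.pyGet?_of_nonneg _ h1]
    have : i.toNat < s.toList.length := by omega
    simp [List.getElem?_eq_getElem this]
  have hkeys : ((PySem.Dict.empty).insert c0 1 : PySem.Dict Char Int).keys = [c0] := by
    rw [PySem.Dict.keys_insert_of_not_contains _ _ (by simp)]
    simp
  have := loop_eq s.toList (PySem.List.pyRange 1 n 1) ((PySem.Dict.empty).insert c0 1) c0
    hrange (by rw [hkeys]; simp) (by
      intro k hk; rw [hkeys] at hk; simp at hk; subst hk
      rw [PySem.Dict.getD_insert]; simp)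
    (by rw [hkeys]; simp)
  rw [hkeys] at this
  exact this
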